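-- pv_equiv track=rewrite | github.com/John75SunCity/ssh-git-github.com-odoo-odoo.git-18.0 | development-tools/remove_duplicate_fields.py | find_duplicate_fields
-- ===== SOURCE A (Python) =====
-- from typing import Dict, List, Set, Tuple
--
-- def find_duplicate_fields(
--     fields: List[Tuple[str, int, str]],
-- ) -> Dict[str, List[Tuple[int, str]]]:
--     """
--     Find duplicate field definitions.
--     Returns dict of {field_name: [(line_number, definition), ...]}
--     """
--     field_occurrences = {}
--
--     for field_name, line_num, definition in fields:
--         if field_name not in field_occurrences:
--             field_occurrences[field_name] = []
--         field_occurrences[field_name].append((line_num, definition))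
--
--     # Return only fields that have duplicates
--     return {
--         name: occurrences
--         for name, occurrences in field_occurrences.items()
--         if len(occurrences) > 1
--     }
-- ===== SOURCE B (Python) =====
-- from typing import Dict, List, Tuple
--
-- def find_duplicate_fields(
--     fields: List[Tuple[str, int, str]],
-- ) -> Dict[str, List[Tuple[int, str]]]:
--     """
--     Find duplicate field definitions.
--     Returns dict of {field_name: [(line_number, definition), ...]}
--     """
--     seen = set()
--     duplicates = {}
--     for field_name, _line_num, _definition in fields:
--         if field_name in seen:
--             continue
--         seen.add(field_name)
--         occurrences = [(ln, d) for name, ln, d in fields if name == field_name]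
--         if len(occurrences) > 1:
--             duplicates[field_name] = occurrences
--     return duplicates
-- ===== Notes on version B (the rewrite author's own statement) =====
-- stated objective: alternative
-- what changed: Instead of hash-accumulating every occurrence into a dict and then filtering, B walks the distinct field names in first-occurrence order (tracked with a set) and for each name rescans the input once to collect its occurrences, keeping only names with more than one; singleton groups are never stored.
import Mathlib
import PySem

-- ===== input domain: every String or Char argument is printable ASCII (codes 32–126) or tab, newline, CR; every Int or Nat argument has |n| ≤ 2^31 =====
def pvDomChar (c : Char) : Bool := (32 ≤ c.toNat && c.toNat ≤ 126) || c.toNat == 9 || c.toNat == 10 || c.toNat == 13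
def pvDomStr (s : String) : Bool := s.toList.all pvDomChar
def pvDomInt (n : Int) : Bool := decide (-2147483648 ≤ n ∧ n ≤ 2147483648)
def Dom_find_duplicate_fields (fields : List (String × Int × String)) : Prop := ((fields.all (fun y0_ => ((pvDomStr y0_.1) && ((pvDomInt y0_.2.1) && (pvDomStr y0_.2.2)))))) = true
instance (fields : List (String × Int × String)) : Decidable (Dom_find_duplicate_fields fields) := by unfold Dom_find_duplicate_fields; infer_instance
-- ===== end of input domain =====

-- B walks the distinct field names in first-occurrence order and rescans the input per name,
-- keeping only names with more than one occurrence (alternative decomposition, not faster).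


-- ===== PORT A =====
def find_duplicate_fields (fields : List (String × Int × String)) : List (String × List (Int × String)) :=
  let field_occurrences : PySem.Dict String (List (Int × String)) :=
    fields.foldl (fun d f =>
      -- if field_name not in field_occurrences: field_occurrences[field_name] = []
      let d := if d.contains f.1 then d else d.insert f.1 []
      -- field_occurrences[field_name].append((line_num, definition))
      d.insert f.1 (d.getD f.1 [] ++ [(f.2.1, f.2.2)])) PySem.Dict.empty
  -- {name: occ for name, occ in items if len(occ) > 1}: the dict's keys are unique,
  -- so the comprehension is exactly a filter of the items list
  field_occurrences.items.filter (fun p => p.2.length > 1)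

-- ===== PORT B =====
def find_duplicate_fields_alt (fields : List (String × Int × String)) : List (String × List (Int × String)) :=
  (fields.foldl (fun (st : PySem.Set String × PySem.Dict String (List (Int × String))) f =>
      if st.1.contains f.1 then st    -- if field_name in seen: continue
      else
        let seen := st.1.add f.1
        let occurrences := (fields.filter (fun g => g.1 == f.1)).map (fun g => (g.2.1, g.2.2))
        if occurrences.length > 1 then (seen, st.2.insert f.1 occurrences) else (seen, st.2))
    (PySem.Set.empty, PySem.Dict.empty)).2.items

-- ===== PRECONDITION & SPEC =====
def Spec_find_duplicate_fields (fields : List (String × Int × String)) (out : List (String × List (Int × String))) : Prop := out = find_duplicate_fields_alt fields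
instance (fields : List (String × Int × String)) (out : List (String × List (Int × String))) : Decidable (Spec_find_duplicate_fields fields out) := by unfold Spec_find_duplicate_fields; infer_instance

-- ===== CLAIM (what is proved, stated in full; the proofs are below) =====
def Claim_equal_find_duplicate_fields : Prop := ∀ (fields : List (String × Int × String)), Dom_find_duplicate_fields fields → Spec_find_duplicate_fields fields (find_duplicate_fields fields)

-- ===== LEMMAS AND PROOFS =====

-- occurrences of name k in the list q, as (line, definition) pairs
def pvOcc (q : List (String × Int × String)) (k : String) : List (Int × String) :=
  (q.filter (fun g => g.1 == k)).map (fun g => (g.2.1, g.2.2))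

-- the distinct names of q in first-occurrence order
def pvNames (q : List (String × Int × String)) : PySem.Set String :=
  PySem.Set.ofList (q.map (fun g => g.1))

-- two dicts with the same items list are equal
lemma pvDictExt {d e : PySem.Dict String (List (Int × String))} (h : d.items = e.items) : d = e := by
  cases d; cases e; simpa [PySem.Dict.items] using h

-- A's accumulator after processing q
def pvAccA (q : List (String × Int × String)) : PySem.Dict String (List (Int × String)) :=
  ⟨(pvNames q).map (fun k => (k, pvOcc q k))⟩

-- B's accumulator after processing prefix q of the full list `fields`
def pvAccB (fields q : List (String × Int × String)) : PySem.Dict String (List (Int × String)) :=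
  ⟨(pvNames q).filterMap (fun k =>
      if (pvOcc fields k).length > 1 then some (k, pvOcc fields k) else none)⟩

-- a key outside the names of the processed prefix is not yet in B's accumulator
lemma pvAccB_not_contains (fields p : List (String × Int × String)) (k : String)
    (h : k ∉ pvNames p) : (pvAccB fields p).contains k = false := by
  simp only [PySem.Dict.contains, pvAccB, List.any_eq_false]
  rintro ⟨k', v⟩ hmem
  simp only [List.mem_filterMap] at hmem
  obtain ⟨a, ha, hsome⟩ := hmem
  split at hsome
  · cases hsome
    intro hbeq
    exact h ((beq_iff_eq.mp hbeq) ▸ ha)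
  · cases hsome


lemma pvOcc_append_singleton (p : List (String × Int × String)) (x : String × Int × String) (k : String) :
    pvOcc (p ++ [x]) k = pvOcc p k ++ (if x.1 == k then [(x.2.1, x.2.2)] else []) := by
  simp only [pvOcc, List.filter_append, List.map_append, List.filter]
  split <;> simp_all

lemma pvOcc_eq_nil (p : List (String × Int × String)) (k : String)
    (h : k ∉ p.map (fun g => g.1)) : pvOcc p k = [] := by
  simp only [pvOcc, List.map_eq_nil_iff, List.filter_eq_nil_iff]
  intro g hg hk
  exact h (List.mem_map.2 ⟨g, hg, by simpa using hk⟩)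

lemma pvNames_append_singleton (p : List (String × Int × String)) (x : String × Int × String) :
    pvNames (p ++ [x]) = (pvNames p).add x.1 := by
  simp [pvNames, PySem.Set.ofList, List.foldl_append]

lemma pvNames_nodup (p : List (String × Int × String)) : (pvNames p).Nodup := by
  simp [pvNames, PySem.Set.nodup_ofList]

lemma mem_pvNames (p : List (String × Int × String)) (k : String) :
    k ∈ pvNames p ↔ k ∈ p.map (fun g => g.1) := by
  simp [pvNames, PySem.Set.mem_ofList]

lemma pvAccA_keys (q : List (String × Int × String)) : (pvAccA q).keys = pvNames q := by
  simp only [pvAccA, PySem.Dict.keys, List.map_map]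
  exact List.map_id _

lemma pvAccA_contains (q : List (String × Int × String)) (k : String) :
    (pvAccA q).contains k = true ↔ k ∈ pvNames q := by
  rw [PySem.Dict.contains_iff_mem_keys, pvAccA_keys]

lemma pvAccA_step (p : List (String × Int × String)) (x : String × Int × String) :
    (let d := if (pvAccA p).contains x.1 then pvAccA p else (pvAccA p).insert x.1 []
     d.insert x.1 (d.getD x.1 [] ++ [(x.2.1, x.2.2)])) = pvAccA (p ++ [x]) := by
  have hnd : (pvAccA p).keys.Nodup := by rw [pvAccA_keys]; exact pvNames_nodup p
  by_cases hm : x.1 ∈ pvNames p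
  · have hc : (pvAccA p).contains x.1 = true := (pvAccA_contains p x.1).2 hm
    have hmem : (x.1, pvOcc p x.1) ∈ (pvAccA p).items := by
      show (x.1, pvOcc p x.1) ∈ (pvNames p).map (fun k => (k, pvOcc p k))
      exact List.mem_map.2 ⟨x.1, hm, rfl⟩
    have hget : (pvAccA p).getD x.1 [] = pvOcc p x.1 :=
      PySem.Dict.getD_of_mem_items _ hmem hnd []
    have hN : pvNames (p ++ [x]) = pvNames p := by
      rw [pvNames_append_singleton]; simp [PySem.Set.add, hm]
    apply pvDictExt
    rw [show (let d := if (pvAccA p).contains x.1 then pvAccA p else (pvAccA p).insert x.1 []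
          d.insert x.1 (d.getD x.1 [] ++ [(x.2.1, x.2.2)]))
        = (pvAccA p).insert x.1 ((pvAccA p).getD x.1 [] ++ [(x.2.1, x.2.2)]) by simp [hc]]
    rw [PySem.Dict.items_insert_of_contains _ _ hc, hget]
    show List.map _ ((pvNames p).map _) = (pvAccA (p ++ [x])).items
    rw [List.map_map]
    simp only [pvAccA, hN]
    apply List.map_congr_left
    intro k hk
    by_cases hkx : k = x.1
    · subst hkx
      simp [pvOcc]
    · have : (k == x.1) = false := by simpa using hkx
      simp only [Function.comp, this, Bool.false_eq_true, if_false,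
        pvOcc_append_singleton]
      have : (x.1 == k) = false := by simpa using fun h => hkx h.symm
      simp [this]
  · have hc : (pvAccA p).contains x.1 = false := by
      rw [Bool.eq_false_iff]; intro h; exact hm ((pvAccA_contains p x.1).1 h)
    have hN : pvNames (p ++ [x]) = pvNames p ++ [x.1] := by
      rw [pvNames_append_singleton]
      simp only [PySem.Set.add]
      rw [if_neg]
      simpa using hm
    have hocc0 : pvOcc p x.1 = [] := pvOcc_eq_nil p x.1 (by rwa [mem_pvNames] at hm)
    have hitems1 : ((pvAccA p).insert x.1 []).items = (pvAccA p).items ++ [(x.1, [])] :=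
      PySem.Dict.items_insert_of_not_contains _ _ hc
    have hnd1 : ((pvAccA p).insert x.1 []).keys.Nodup := PySem.Dict.nodup_keys_insert _ _ _ hnd
    have hc1 : ((pvAccA p).insert x.1 []).contains x.1 = true := PySem.Dict.contains_insert_self _ _ _
    have hget1 : ((pvAccA p).insert x.1 []).getD x.1 [] = [] := by
      apply PySem.Dict.getD_of_mem_items _ _ hnd1
      rw [hitems1]
      exact List.mem_append_right _ (by simp)
    apply pvDictExt
    rw [show (let d := if (pvAccA p).contains x.1 then pvAccA p else (pvAccA p).insert x.1 []
          d.insert x.1 (d.getD x.1 [] ++ [(x.2.1, x.2.2)]))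
        = ((pvAccA p).insert x.1 []).insert x.1 (((pvAccA p).insert x.1 []).getD x.1 [] ++ [(x.2.1, x.2.2)]) by
        simp [hc]]
    rw [PySem.Dict.items_insert_of_contains _ _ hc1, hget1, hitems1]
    simp only [List.map_append, List.map_map, pvAccA, hN]
    congr 1
    · apply List.map_congr_left
      intro k hk
      have hkx : ¬ k = x.1 := fun h => hm (h ▸ hk)
      have h1 : (k == x.1) = false := by simpa using hkx
      have h2 : (x.1 == k) = false := by simpa using fun h => hkx h.symm
      simp [Function.comp, h1, pvOcc_append_singleton, h2]
    · have hx : pvOcc (p ++ [x]) x.1 = [(x.2.1, x.2.2)] := by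
        rw [pvOcc_append_singleton, hocc0]; simp
      simp [hx]

lemma A_loop (l p : List (String × Int × String)) :
    l.foldl (fun d f =>
      let d := if d.contains f.1 then d else d.insert f.1 []
      d.insert f.1 (d.getD f.1 [] ++ [(f.2.1, f.2.2)])) (pvAccA p) = pvAccA (p ++ l) := by
  induction l generalizing p with
  | nil => simp
  | cons x l ih =>
    rw [List.foldl_cons, pvAccA_step p x, ih]
    simp

lemma pvAccB_step (fields p : List (String × Int × String)) (x : String × Int × String) :
    (if (pvNames p).contains x.1 then (pvNames p, pvAccB fields p)
     else
       let seen := (pvNames p).add x.1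
       let occurrences := (fields.filter (fun g => g.1 == x.1)).map (fun g => (g.2.1, g.2.2))
       if occurrences.length > 1 then (seen, (pvAccB fields p).insert x.1 occurrences)
       else (seen, pvAccB fields p)) = (pvNames (p ++ [x]), pvAccB fields (p ++ [x])) := by
  by_cases hm : x.1 ∈ pvNames p
  · have hc : ((pvNames p) : List String).contains x.1 = true := by simpa using hm
    have hN : pvNames (p ++ [x]) = pvNames p := by
      rw [pvNames_append_singleton]; simp [PySem.Set.add, hm]
    have hB : pvAccB fields (p ++ [x]) = pvAccB fields p := by
      simp only [pvAccB, hN]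
    simp only [hc, if_true, hN, hB]
  · have hc : ((pvNames p) : List String).contains x.1 = false := by simpa using hm
    have hcd : (pvAccB fields p).contains x.1 = false := pvAccB_not_contains fields p x.1 hm
    have hN : pvNames (p ++ [x]) = pvNames p ++ [x.1] := by
      rw [pvNames_append_singleton]
      simp only [PySem.Set.add]
      rw [if_neg]
      simpa using hm
    have hadd : (pvNames p).add x.1 = pvNames p ++ [x.1] := by
      simp only [PySem.Set.add]
      rw [if_neg]
      simpa using hm
    have hfil : (fields.filter (fun g => g.1 == x.1)).map (fun g => (g.2.1, g.2.2)) = pvOcc fields x.1 := rfl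
    have hB : (pvAccB fields (p ++ [x])).items = (pvAccB fields p).items
        ++ (if (pvOcc fields x.1).length > 1 then [(x.1, pvOcc fields x.1)] else []) := by
      simp only [pvAccB, hN, List.filterMap_append]
      congr 1
      simp only [List.filterMap]
      split <;> simp_all
    simp only [hc, Bool.false_eq_true, if_false, hfil, hadd, hN]
    by_cases hlen : (pvOcc fields x.1).length > 1
    · rw [if_pos hlen]
      refine Prod.ext rfl ?_
      apply pvDictExt
      rw [PySem.Dict.items_insert_of_not_contains _ _ hcd, hB, if_pos hlen]
    · rw [if_neg hlen]
      refine Prod.ext rfl ?_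
      apply pvDictExt
      rw [hB, if_neg hlen]
      simp

lemma B_loop (fields l p : List (String × Int × String)) :
    l.foldl (fun (st : PySem.Set String × PySem.Dict String (List (Int × String))) f =>
      if st.1.contains f.1 then st
      else
        let seen := st.1.add f.1
        let occurrences := (fields.filter (fun g => g.1 == f.1)).map (fun g => (g.2.1, g.2.2))
        if occurrences.length > 1 then (seen, st.2.insert f.1 occurrences) else (seen, st.2))
      (pvNames p, pvAccB fields p) = (pvNames (p ++ l), pvAccB fields (p ++ l)) := by
  induction l generalizing p with
  | nil => simp
  | cons x l ih =>
    rw [List.foldl_cons, pvAccB_step fields p x, ih]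
    simp

lemma filter_map_eq_filterMap (l : List String) (f : String → List (Int × String)) :
    (l.map (fun k => (k, f k))).filter (fun p => p.2.length > 1)
      = l.filterMap (fun k => if (f k).length > 1 then some (k, f k) else none) := by
  induction l with
  | nil => rfl
  | cons a l ih =>
    simp only [List.map_cons, List.filter_cons, List.filterMap_cons]
    split <;> split <;> (simp_all; try omega)

-- ===== VERDICT (by name: the statement is the Claim_ definition above) =====
theorem find_duplicate_fields_spec : Claim_equal_find_duplicate_fields := by
  intro fields _
  show _ = _
  unfold find_duplicate_fields find_duplicate_fields_alt
  have hA : PySem.Dict.empty = pvAccA ([] : List (String × Int × String)) := by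
    simp [pvAccA, pvNames, PySem.Set.ofList, PySem.Dict.empty]
  have hB : ((PySem.Set.empty : PySem.Set String), (PySem.Dict.empty : PySem.Dict String (List (Int × String))))
      = (pvNames ([] : List (String × Int × String)), pvAccB fields []) := by
    simp [pvAccB, pvNames, PySem.Set.ofList, PySem.Set.empty, PySem.Dict.empty]
  rw [hB, hA, A_loop fields [], B_loop fields fields []]
  simp only [List.nil_append]
  simp only [pvAccA, pvAccB]
  rw [filter_map_eq_filterMap]
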